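-- pv_equiv track=rewrite | github.com/Minki-Trader/Project_Obsidian_Prime_v2 | foundation/mt5/strategy_report.py | _cell_after
-- ===== SOURCE A (Python) =====
-- from typing import Any, Sequence
--
-- def _normalize_report_label(value: Any) -> str:
--     return str(value or "").strip().rstrip(":").casefold()
--
-- def _cell_after(row: Sequence[str], aliases: Sequence[str]) -> str | None:
--     normalized_aliases = {_normalize_report_label(alias) for alias in aliases}
--     for index, cell in enumerate(row[:-1]):
--         if _normalize_report_label(cell) in normalized_aliases:
--             for next_cell in row[index + 1 :]:
--                 if str(next_cell).strip():
--                     return next_cell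
--     return None
-- ===== SOURCE B (Python) =====
-- def _cell_after(row, aliases):
--     def norm(v):
--         return str(v or "").strip().rstrip(":").casefold()
--     normalized = {norm(a) for a in aliases}
--     # backward carry pass: next_nonempty[i] = first cell after position i whose str().strip() is truthy
--     next_nonempty = [None] * len(row)
--     carry = None
--     for i in range(len(row) - 1, -1, -1):
--         next_nonempty[i] = carry
--         if str(row[i]).strip():
--             carry = row[i]
--     for cell, nxt in zip(row[:-1], next_nonempty):
--         if norm(cell) in normalized and nxt is not None:
--             return nxt
--     return None
-- ===== Notes on version B (the rewrite author's own statement) =====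
-- stated objective: alternative
-- what changed: Replaces the per-match forward rescan of the row suffix by one backward carry pass precomputing each position's next non-empty cell, then a single forward pass over the labels; it trades the nested rescan for an extra precomputed list.
import Mathlib
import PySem

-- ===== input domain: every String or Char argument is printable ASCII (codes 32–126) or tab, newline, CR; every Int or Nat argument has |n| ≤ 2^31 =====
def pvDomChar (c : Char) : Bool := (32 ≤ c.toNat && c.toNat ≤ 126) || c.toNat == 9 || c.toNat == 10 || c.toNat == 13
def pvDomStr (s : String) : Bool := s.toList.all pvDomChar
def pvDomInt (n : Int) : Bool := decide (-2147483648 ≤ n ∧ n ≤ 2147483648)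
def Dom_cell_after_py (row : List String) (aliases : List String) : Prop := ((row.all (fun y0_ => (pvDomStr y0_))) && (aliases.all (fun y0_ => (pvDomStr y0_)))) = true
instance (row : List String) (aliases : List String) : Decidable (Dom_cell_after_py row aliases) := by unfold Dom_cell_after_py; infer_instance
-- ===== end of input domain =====

-- B replaces A's rescans of the row suffix after each matching label by one backward carry
-- pass precomputing the next non-empty cell for every position, then a single forward pass
-- over the labels (objective: alternative algorithm; same result always).

-- shared helper: _normalize_report_label(v) = str(v or "").strip().rstrip(":").casefold()
-- ('str(v or "")' is the identity on str inputs; '.casefold()' = lower, exact on the ASCII domain;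
--  '.rstrip(":")' drops trailing ':' characters — ported by hand, exact)
def pvNorm (v : String) : List Char :=
  PySem.Chars.lower ((((PySem.Chars.strip v.toList).reverse.dropWhile (· == ':')).reverse))

-- ===== PORT A =====
-- inner loop: 'for next_cell in row[index+1:]: if str(next_cell).strip(): return next_cell'
def aFindNext : List String → Option String
  | [] => none
  | c :: rest => if PySem.Chars.strip c.toList ≠ [] then some c else aFindNext rest

-- outer loop over enumerate(row[:-1])
def aLoop (na : List (List Char)) (row : List String) : List (Int × String) → Option String
  | [] => none
  | (idx, cell) :: rest =>
      if na.contains (pvNorm cell) then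
        match aFindNext (PySem.List.slice row (some (idx + 1)) none) with
        | some v => some v
        | none => aLoop na row rest
      else aLoop na row rest

def cell_after_py (row : List String) (aliases : List String) : Option String :=
  aLoop (PySem.Set.ofList (aliases.map pvNorm)) row
    (PySem.List.enumerate (PySem.List.slice row none (some (-1))) 0)

-- ===== PORT B =====
-- backward carry pass: returns (next_nonempty list, carry) for the given suffix of the row
def bNext : List String → List (Option String) × Option String
  | [] => ([], none)
  | c :: rest =>
      let p := bNext rest
      (p.2 :: p.1, if (PySem.Chars.strip c.toList).isEmpty then p.2 else some c)

-- forward pass over zip(row[:-1], next_nonempty)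
def bScan (na : List (List Char)) : List (String × Option String) → Option String
  | [] => none
  | (cell, nxt) :: rest =>
      if na.contains (pvNorm cell) && nxt.isSome then nxt else bScan na rest

def cell_after_py_alt (row : List String) (aliases : List String) : Option String :=
  bScan (PySem.Set.ofList (aliases.map pvNorm))
    ((PySem.List.slice row none (some (-1))).zip (bNext row).1)

-- ===== PRECONDITION & SPEC =====
def Spec_cell_after_py (row : List String) (aliases : List String) (out : Option String) : Prop := out = cell_after_py_alt row aliases
instance (row : List String) (aliases : List String) (out : Option String) : Decidable (Spec_cell_after_py row aliases out) := by unfold Spec_cell_after_py; infer_instance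

-- ===== CLAIM (what is proved, stated in full; the proofs are below) =====
def Claim_equal_cell_after_py : Prop := ∀ (row : List String) (aliases : List String), Dom_cell_after_py row aliases → Spec_cell_after_py row aliases (cell_after_py row aliases)

-- ===== LEMMAS AND PROOFS =====

-- reference recursion both sides reduce to
def refLoop (na : List (List Char)) : List String → Option String
  | [] => none
  | c :: rest =>
      if na.contains (pvNorm c) && (aFindNext rest).isSome then aFindNext rest
      else refLoop na rest

theorem bNext_snd (row : List String) : (bNext row).2 = aFindNext row := by
  induction row with
  | nil => rfl
  | cons c rest ih =>
      simp only [bNext, aFindNext, List.isEmpty_iff]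
      split_ifs <;> simp_all

theorem aLoop_eq_ref (na : List (List Char)) (full : List String) :
    ∀ (xs : List String) (k : Nat), full.drop k = xs →
      aLoop na full (PySem.List.enumerate xs.dropLast (k : Int)) = refLoop na xs := by
  intro xs
  induction xs with
  | nil => intro k _; rfl
  | cons c rest ih =>
      intro k hk
      cases rest with
      | nil => simp [refLoop, aFindNext, aLoop]
      | cons d rs =>
          have hdl : (c :: d :: rs).dropLast = c :: (d :: rs).dropLast := rfl
          rw [hdl, PySem.List.enumerate_cons]
          have hcast : ((k : Int) + 1) = ((k + 1 : Nat) : Int) := by push_cast; ring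
          have hdrop : full.drop (k + 1) = d :: rs := by
            rw [← List.tail_drop, hk]; rfl
          have hs : PySem.List.slice full (some ((k : Int) + 1)) none = d :: rs := by
            rw [hcast, PySem.List.slice_from_natCast, hdrop]
          have ih' := ih (k + 1) hdrop
          rw [← hcast] at ih'
          simp only [aLoop, hs, ih']
          conv_rhs => rw [refLoop]
          by_cases hc2 : na.contains (pvNorm c) = true <;>
            cases h : aFindNext (d :: rs) <;> simp_all

theorem bScan_eq_ref (na : List (List Char)) (xs : List String) :
    bScan na (xs.dropLast.zip (bNext xs).1) = refLoop na xs := by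
  induction xs with
  | nil => rfl
  | cons c rest ih =>
      cases rest with
      | nil => simp [bScan, refLoop, aFindNext, bNext]
      | cons d rs =>
          show bScan na ((c :: (d :: rs).dropLast).zip
            ((bNext (d :: rs)).2 :: (bNext (d :: rs)).1)) = refLoop na (c :: d :: rs)
          rw [List.zip_cons_cons]
          simp only [bScan, bNext_snd, ih]
          conv_rhs => rw [refLoop]

-- ===== VERDICT (by name: the statement is the Claim_ definition above) =====
theorem cell_after_py_spec : Claim_equal_cell_after_py := by
  intro row aliases _
  unfold Spec_cell_after_py cell_after_py cell_after_py_alt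
  rw [PySem.List.slice_to_neg_one]
  have hA := aLoop_eq_ref (PySem.Set.ofList (aliases.map pvNorm)) row row 0 List.drop_zero
  norm_num at hA
  rw [hA, ← bScan_eq_ref]
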